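-- pv_equiv track=rewrite | github.com/puspanDas/project-X | backend/ai_service.py | _determine_threat_type
-- ===== SOURCE A (Python) =====
-- THREAT_TYPE_MAP = [
--     ({"fraud", "phishing"}, "Fraud / Phishing"),
--     ({"scam"},              "Scam"),
--     ({"harassment"},        "Harassment"),
--     ({"robocall", "telemarketer"}, "Telemarketing"),
--     ({"spam"},              "Spam"),
-- ]
--
-- def _determine_threat_type(trace_data: dict, reports: list, score: int) -> str:
--     """Classify the threat type from report types and trace data."""
--     report_types = {r.get("type", "").lower() for r in reports}
--
--     # Check ordered threat map
--     for type_set, label in THREAT_TYPE_MAP: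
--         if report_types & type_set:
--             return label
--
--     # Fallback heuristics based on trace data
--     line_type = (trace_data.get("line_type") or "").lower()
--     if line_type == "voip" and score >= 30:
--         return "Suspicious VoIP"
--     if line_type == "premium rate":
--         return "Premium Rate"
--     if score >= 45:
--         return "Suspicious"
--     if score >= 25:
--         return "Potentially Unwanted"
--     return "Clean"
-- ===== SOURCE B (Python) =====
-- KEYWORD_LOOKUP = {
--     "fraud": (0, "Fraud / Phishing"),
--     "phishing": (0, "Fraud / Phishing"),
--     "scam": (1, "Scam"),
--     "harassment": (2, "Harassment"),
--     "robocall": (3, "Telemarketing"),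
--     "telemarketer": (3, "Telemarketing"),
--     "spam": (4, "Spam"),
-- }
--
-- def _determine_threat_type(trace_data: dict, reports: list, score: int) -> str:
--     """Classify the threat type: one pass over reports tracking the minimum-priority keyword hit."""
--     best = None
--     for r in reports:
--         hit = KEYWORD_LOOKUP.get(r.get("type", "").lower())
--         if hit is not None and (best is None or hit[0] < best[0]):
--             best = hit
--     if best is not None:
--         return best[1]
--     line_type = (trace_data.get("line_type") or "").lower()
--     if line_type == "voip" and score >= 30:
--         return "Suspicious VoIP"
--     if line_type == "premium rate":
--         return "Premium Rate"
--     if score >= 45: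
--         return "Suspicious"
--     if score >= 25:
--         return "Potentially Unwanted"
--     return "Clean"
-- ===== Notes on version B (the rewrite author's own statement) =====
-- stated objective: alternative
-- what changed: Replaces the build-a-set-then-intersect-against-each-map-entry scan with a single pass over the reports using an inverted keyword->(priority,label) dict and a min-priority accumulator; keyword-set disjointness makes min-priority equal to first-map-entry-wins.
import Mathlib
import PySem

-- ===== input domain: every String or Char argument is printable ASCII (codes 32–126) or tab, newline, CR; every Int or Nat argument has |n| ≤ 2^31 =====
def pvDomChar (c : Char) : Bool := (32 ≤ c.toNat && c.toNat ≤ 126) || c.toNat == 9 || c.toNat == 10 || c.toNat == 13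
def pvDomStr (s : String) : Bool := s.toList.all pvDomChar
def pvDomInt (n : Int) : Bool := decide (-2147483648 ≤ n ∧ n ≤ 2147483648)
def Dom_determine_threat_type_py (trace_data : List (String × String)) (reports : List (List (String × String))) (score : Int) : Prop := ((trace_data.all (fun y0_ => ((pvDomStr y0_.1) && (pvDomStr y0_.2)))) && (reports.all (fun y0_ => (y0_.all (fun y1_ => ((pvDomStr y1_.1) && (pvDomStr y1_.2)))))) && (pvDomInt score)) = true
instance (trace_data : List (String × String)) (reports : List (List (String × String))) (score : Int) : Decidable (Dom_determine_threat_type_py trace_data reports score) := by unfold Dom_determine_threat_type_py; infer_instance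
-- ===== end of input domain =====

-- B replaces A's build-a-set / intersect-each-map-entry scan by one pass over the reports with an
-- inverted keyword -> (priority, label) lookup and a min-priority accumulator (objective: alternative).

-- ===== PORT A =====
-- dict.get(k, d) on an association list: first match (exact for the stated dict convention)
def pvGet (r : List (String × String)) (k d : String) : String :=
  match r.find? (fun p => p.1 == k) with
  | some p => p.2
  | none => d

def pvThreatTypeMap : List (PySem.Set String × String) :=
  [(PySem.Set.ofList ["fraud", "phishing"], "Fraud / Phishing"),
   (PySem.Set.ofList ["scam"], "Scam"),
   (PySem.Set.ofList ["harassment"], "Harassment"),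
   (PySem.Set.ofList ["robocall", "telemarketer"], "Telemarketing"),
   (PySem.Set.ofList ["spam"], "Spam")]

-- the for loop over THREAT_TYPE_MAP with its early return
def pvScanMap (entries : List (PySem.Set String × String)) (report_types : PySem.Set String) : Option String :=
  match entries with
  | [] => none
  | (type_set, label) :: rest =>
    if !(PySem.Set.inter report_types type_set).isEmpty then some label
    else pvScanMap rest report_types

def determine_threat_type_py (trace_data : List (String × String)) (reports : List (List (String × String))) (score : Int) : String :=
  -- report_types = {r.get("type", "").lower() for r in reports}
  let report_types : PySem.Set String :=
    PySem.Set.ofList (reports.map (fun r => PySem.Str.lower (pvGet r "type" "")))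
  match pvScanMap pvThreatTypeMap report_types with
  | some label => label
  | none =>
    let line_type := PySem.Str.lower (pvGet trace_data "line_type" "")
    if line_type == "voip" && score ≥ 30 then "Suspicious VoIP"
    else if line_type == "premium rate" then "Premium Rate"
    else if score ≥ 45 then "Suspicious"
    else if score ≥ 25 then "Potentially Unwanted"
    else "Clean"

-- ===== PORT B =====
-- KEYWORD_LOOKUP.get(t): the inverted keyword -> (priority, label) dict
def pvPrio? (t : String) : Option (Int × String) :=
  if t == "fraud" then some (0, "Fraud / Phishing")
  else if t == "phishing" then some (0, "Fraud / Phishing")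
  else if t == "scam" then some (1, "Scam")
  else if t == "harassment" then some (2, "Harassment")
  else if t == "robocall" then some (3, "Telemarketing")
  else if t == "telemarketer" then some (3, "Telemarketing")
  else if t == "spam" then some (4, "Spam")
  else none

-- one iteration of B's loop: keep the hit of minimal priority
def pvStep (b : Option (Int × String)) (r : List (String × String)) : Option (Int × String) :=
  match pvPrio? (PySem.Str.lower (pvGet r "type" "")) with
  | none => b
  | some (p, l) =>
    match b with
    | none => some (p, l)
    | some (q, m) => if p < q then some (p, l) else some (q, m)

def determine_threat_type_py_alt (trace_data : List (String × String)) (reports : List (List (String × String))) (score : Int) : String :=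
  match reports.foldl pvStep none with
  | some (_, l) => l
  | none =>
    let line_type := PySem.Str.lower (pvGet trace_data "line_type" "")
    if line_type == "voip" && score ≥ 30 then "Suspicious VoIP"
    else if line_type == "premium rate" then "Premium Rate"
    else if score ≥ 45 then "Suspicious"
    else if score ≥ 25 then "Potentially Unwanted"
    else "Clean"

-- ===== PRECONDITION & SPEC =====
def Spec_determine_threat_type_py (trace_data : List (String × String)) (reports : List (List (String × String))) (score : Int) (out : String) : Prop := out = determine_threat_type_py_alt trace_data reports score
instance (trace_data : List (String × String)) (reports : List (List (String × String))) (score : Int) (out : String) : Decidable (Spec_determine_threat_type_py trace_data reports score out) := by unfold Spec_determine_threat_type_py; infer_instance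

-- ===== CLAIM (what is proved, stated in full; the proofs are below) =====
def Claim_equal_determine_threat_type_py : Prop := ∀ (trace_data : List (String × String)) (reports : List (List (String × String))) (score : Int), Dom_determine_threat_type_py trace_data reports score → Spec_determine_threat_type_py trace_data reports score (determine_threat_type_py trace_data reports score)

-- ===== LEMMAS AND PROOFS =====

-- merging two bests = keeping the earlier one unless the later has strictly smaller priority
def pvMerge (a b : Option (Int × String)) : Option (Int × String) :=
  match a, b with
  | none, b => b
  | a, none => a
  | some (q, m), some (p, l) => if p < q then some (p, l) else some (q, m)

theorem pvStep_eq_merge (b : Option (Int × String)) (r : List (String × String)) :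
    pvStep b r = pvMerge b (pvPrio? (PySem.Str.lower (pvGet r "type" ""))) := by
  unfold pvStep pvMerge
  rcases pvPrio? (PySem.Str.lower (pvGet r "type" "")) with _ | ⟨p, l⟩ <;>
    rcases b with _ | ⟨q, m⟩ <;> simp

theorem pvMerge_none (b : Option (Int × String)) : pvMerge none b = b := rfl

theorem pvMerge_assoc (a b c : Option (Int × String)) :
    pvMerge (pvMerge a b) c = pvMerge a (pvMerge b c) := by
  rcases a with _ | ⟨qa, ma⟩ <;> rcases b with _ | ⟨qb, mb⟩ <;> rcases c with _ | ⟨qc, mc⟩ <;>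
    simp only [pvMerge] <;> split_ifs <;> simp only [pvMerge] <;> split_ifs <;>
    first | rfl | (intros; exfalso; omega)

theorem pvFoldl_merge (ts : List (List (String × String))) (b : Option (Int × String)) :
    ts.foldl pvStep b = pvMerge b (ts.foldl pvStep none) := by
  induction ts generalizing b with
  | nil => cases b <;> rfl
  | cons t ts ih =>
    rw [List.foldl_cons, List.foldl_cons, ih (pvStep b t), ih (pvStep none t),
        pvStep_eq_merge, pvStep_eq_merge none t, pvMerge_assoc]
    rfl

-- one cons-step of the characterization, for an arbitrary key k and tail conditions A0..A4
set_option maxHeartbeats 1600000 in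
theorem pvMerge_prio_chain (k : String) (A0 A1 A2 A3 A4 : Bool) :
    pvMerge (pvPrio? k)
      (if A0 then some ((0 : Int), "Fraud / Phishing")
       else if A1 then some ((1 : Int), "Scam")
       else if A2 then some ((2 : Int), "Harassment")
       else if A3 then some ((3 : Int), "Telemarketing")
       else if A4 then some ((4 : Int), "Spam")
       else none) =
      (if (k == "fraud" || k == "phishing" || A0) then some ((0 : Int), "Fraud / Phishing")
       else if (k == "scam" || A1) then some ((1 : Int), "Scam")
       else if (k == "harassment" || A2) then some ((2 : Int), "Harassment")
       else if (k == "robocall" || k == "telemarketer" || A3) then some ((3 : Int), "Telemarketing")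
       else if (k == "spam" || A4) then some ((4 : Int), "Spam")
       else none) := by
  unfold pvPrio? pvMerge
  split_ifs <;> simp_all

-- characterization of B's fold by "is some matching keyword present"
theorem pvFold_char (ts : List (List (String × String))) :
    ts.foldl pvStep none =
      (if ts.any (fun r => (fun t => t == "fraud" || t == "phishing") (PySem.Str.lower (pvGet r "type" ""))) then some (0, "Fraud / Phishing")
       else if ts.any (fun r => PySem.Str.lower (pvGet r "type" "") == "scam") then some (1, "Scam")
       else if ts.any (fun r => PySem.Str.lower (pvGet r "type" "") == "harassment") then some (2, "Harassment")
       else if ts.any (fun r => (fun t => t == "robocall" || t == "telemarketer") (PySem.Str.lower (pvGet r "type" ""))) then some (3, "Telemarketing")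
       else if ts.any (fun r => PySem.Str.lower (pvGet r "type" "") == "spam") then some (4, "Spam")
       else none) := by
  induction ts with
  | nil => rfl
  | cons t ts ih =>
    rw [List.foldl_cons, pvFoldl_merge, ih, pvStep_eq_merge, pvMerge_none,
        pvMerge_prio_chain]
    simp only [List.any_cons]
    rfl

-- A's per-entry test "report_types & type_set is nonempty" as an any over the original list
theorem pvInterNonempty (ts u : List String) :
    (!(PySem.Set.inter (PySem.Set.ofList ts) u).isEmpty) = ts.any (fun t => u.contains t) := by
  rw [Bool.eq_iff_iff]
  simp [List.eq_nil_iff_forall_not_mem, PySem.Set.mem_inter,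
        PySem.Set.mem_ofList, List.any_eq_true]

-- ===== VERDICT (by name: the statement is the Claim_ definition above) =====
set_option maxHeartbeats 1600000 in
theorem determine_threat_type_py_spec : Claim_equal_determine_threat_type_py := by
  intro trace_data reports score _
  unfold Spec_determine_threat_type_py determine_threat_type_py determine_threat_type_py_alt
  rw [pvFold_char]
  have e1 : PySem.Set.ofList ["fraud", "phishing"] = ["fraud", "phishing"] := rfl
  have e2 : PySem.Set.ofList ["scam"] = ["scam"] := rfl
  have e3 : PySem.Set.ofList ["harassment"] = ["harassment"] := rfl
  have e4 : PySem.Set.ofList ["robocall", "telemarketer"] = ["robocall", "telemarketer"] := rfl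
  have e5 : PySem.Set.ofList ["spam"] = ["spam"] := rfl
  simp only [pvThreatTypeMap, pvScanMap, pvInterNonempty, List.any_map, Function.comp_def,
             e1, e2, e3, e4, e5, List.contains_cons, List.contains_nil, Bool.or_false]
  split_ifs <;> rfl
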